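-- pv_equiv track=rewrite | github.com/SFU-HiAccel/AutoNTT | code_generators/dataflow/shuffler/shuffler.py | generate_offset_0
-- ===== SOURCE A (Python) =====
-- def generate_offset_0(LAST_H_BU_NUM, CONCAT_FACTOR, LAST_CONCAT_FACTOR):
--     result = [0]
--     value = CONCAT_FACTOR - 1
--     minus = CONCAT_FACTOR // (1 << (LAST_H_BU_NUM - 1)) - 1
--     for i in range(LAST_CONCAT_FACTOR - 1):
--         result.append(value)
--         if i % 2 == 0:  # Even index: decrement by minus
--             value -= minus
--         else:  # Odd index: decrement by 1
--             value -= 1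
--     return result
-- ===== SOURCE B (Python) =====
-- def generate_offset_0(LAST_H_BU_NUM, CONCAT_FACTOR, LAST_CONCAT_FACTOR):
--     minus = CONCAT_FACTOR // (1 << (LAST_H_BU_NUM - 1)) - 1
--     return [0] + [CONCAT_FACTOR - 1 - (k // 2) * (minus + 1) - (k % 2) * minus
--                   for k in range(LAST_CONCAT_FACTOR - 1)]
-- ===== Notes on version B (the rewrite author's own statement) =====
-- stated objective: simpler
-- what changed: Replaced the running accumulator with an alternating even/odd decrement branch by a direct closed-form expression per index: element k+1 is CONCAT_FACTOR-1 minus (k//2)*(minus+1) + (k%2)*minus, built as a single comprehension.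
import Mathlib
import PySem

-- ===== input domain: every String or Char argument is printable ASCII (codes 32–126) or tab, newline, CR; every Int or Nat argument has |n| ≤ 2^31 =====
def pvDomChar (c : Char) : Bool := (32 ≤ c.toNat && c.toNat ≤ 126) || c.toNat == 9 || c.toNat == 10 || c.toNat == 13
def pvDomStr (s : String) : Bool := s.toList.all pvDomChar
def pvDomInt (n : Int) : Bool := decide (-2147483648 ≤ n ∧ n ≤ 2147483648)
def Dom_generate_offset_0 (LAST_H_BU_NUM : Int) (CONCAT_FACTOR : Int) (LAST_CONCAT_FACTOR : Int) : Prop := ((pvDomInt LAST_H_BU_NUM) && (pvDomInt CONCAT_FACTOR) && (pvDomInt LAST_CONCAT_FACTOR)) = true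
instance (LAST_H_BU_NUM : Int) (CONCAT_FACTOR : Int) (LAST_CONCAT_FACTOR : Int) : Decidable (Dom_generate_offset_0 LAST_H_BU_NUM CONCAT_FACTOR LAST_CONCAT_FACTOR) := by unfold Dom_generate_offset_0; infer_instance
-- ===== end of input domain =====

-- ===== PORT A =====
-- B replaces A's running accumulator and alternating branch by a per-index closed form (objective: simpler).
def generate_offset_0 (LAST_H_BU_NUM : Int) (CONCAT_FACTOR : Int) (LAST_CONCAT_FACTOR : Int) : List Int :=
  let minus : Int := PySem.Int.floordiv CONCAT_FACTOR (1 <<< (LAST_H_BU_NUM - 1).toNat) - 1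
  let st := (PySem.List.pyRange 0 (LAST_CONCAT_FACTOR - 1) 1).foldl
    (fun (st : List Int × Int) i =>
      let result := st.1 ++ [st.2]
      if PySem.Int.mod i 2 = 0 then (result, st.2 - minus) else (result, st.2 - 1))
    ([0], CONCAT_FACTOR - 1)
  st.1

-- ===== PORT B =====
def generate_offset_0_alt (LAST_H_BU_NUM : Int) (CONCAT_FACTOR : Int) (LAST_CONCAT_FACTOR : Int) : List Int :=
  let minus : Int := PySem.Int.floordiv CONCAT_FACTOR (1 <<< (LAST_H_BU_NUM - 1).toNat) - 1
  [0] ++ (PySem.List.pyRange 0 (LAST_CONCAT_FACTOR - 1) 1).map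
    (fun k => CONCAT_FACTOR - 1 - (PySem.Int.floordiv k 2) * (minus + 1) - (PySem.Int.mod k 2) * minus)

-- ===== PRECONDITION & SPEC =====
-- Pre_ excludes only LAST_H_BU_NUM < 1, where Python's `1 << (LAST_H_BU_NUM - 1)` raises ValueError.
def Pre_generate_offset_0 (LAST_H_BU_NUM : Int) (CONCAT_FACTOR : Int) (LAST_CONCAT_FACTOR : Int) : Prop :=
  1 ≤ LAST_H_BU_NUM
instance (LAST_H_BU_NUM : Int) (CONCAT_FACTOR : Int) (LAST_CONCAT_FACTOR : Int) : Decidable (Pre_generate_offset_0 LAST_H_BU_NUM CONCAT_FACTOR LAST_CONCAT_FACTOR) := by unfold Pre_generate_offset_0; infer_instance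
def pvWitness_generate_offset_0 : Int × Int × Int := (2, 8, 6)

def Spec_generate_offset_0 (LAST_H_BU_NUM : Int) (CONCAT_FACTOR : Int) (LAST_CONCAT_FACTOR : Int) (out : List Int) : Prop := out = generate_offset_0_alt LAST_H_BU_NUM CONCAT_FACTOR LAST_CONCAT_FACTOR
instance (LAST_H_BU_NUM : Int) (CONCAT_FACTOR : Int) (LAST_CONCAT_FACTOR : Int) (out : List Int) : Decidable (Spec_generate_offset_0 LAST_H_BU_NUM CONCAT_FACTOR LAST_CONCAT_FACTOR out) := by unfold Spec_generate_offset_0; infer_instance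

-- ===== CLAIM (what is proved, stated in full; the proofs are below) =====
def Claim_equal_generate_offset_0 : Prop := ∀ (LAST_H_BU_NUM : Int) (CONCAT_FACTOR : Int) (LAST_CONCAT_FACTOR : Int), Dom_generate_offset_0 LAST_H_BU_NUM CONCAT_FACTOR LAST_CONCAT_FACTOR → Pre_generate_offset_0 LAST_H_BU_NUM CONCAT_FACTOR LAST_CONCAT_FACTOR → Spec_generate_offset_0 LAST_H_BU_NUM CONCAT_FACTOR LAST_CONCAT_FACTOR (generate_offset_0 LAST_H_BU_NUM CONCAT_FACTOR LAST_CONCAT_FACTOR)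

-- ===== LEMMAS AND PROOFS =====

-- B's closed form for index k, as a function of the Nat index.
def pvF (b minus : Int) (k : Nat) : Int :=
  b - 1 - ((k / 2 : Nat) : Int) * (minus + 1) - ((k % 2 : Nat) : Int) * minus

-- A's loop invariant: after m iterations the list is [0] ++ the first m closed-form
-- values, and the accumulator holds the closed-form value for index m.
theorem pvLoopA (b minus : Int) (m : Nat) :
    ((List.range m).map (fun k : Nat => (k : Int))).foldl
      (fun (st : List Int × Int) i =>
        if PySem.Int.mod i 2 = 0 then (st.1 ++ [st.2], st.2 - minus) else (st.1 ++ [st.2], st.2 - 1))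
      ([0], b - 1)
    = ((0 : Int) :: (List.range m).map (pvF b minus), pvF b minus m) := by
  induction m with
  | zero => simp [pvF]
  | succ m ih =>
    rw [List.range_succ, List.map_append, List.foldl_append, ih]
    simp only [List.map_cons, List.map_nil, List.foldl_cons, List.foldl_nil, List.map_append]
    rcases Nat.even_or_odd m with ⟨t, ht⟩ | ⟨t, ht⟩
    · have h2 : PySem.Int.mod ((m : Nat) : Int) 2 = 0 := by
        rw [show (2 : Int) = ((2 : Nat) : Int) from rfl, PySem.Int.mod_natCast]
        omega
      rw [if_pos h2]
      subst ht
      simp only [pvF, Prod.mk.injEq]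
      refine ⟨by simp, ?_⟩
      have e1 : (t + t) / 2 = t := by omega
      have e2 : (t + t) % 2 = 0 := by omega
      have e3 : (t + t + 1) / 2 = t := by omega
      have e4 : (t + t + 1) % 2 = 1 := by omega
      rw [e1, e2, e3, e4]; push_cast; ring
    · have h2 : ¬ PySem.Int.mod ((m : Nat) : Int) 2 = 0 := by
        rw [show (2 : Int) = ((2 : Nat) : Int) from rfl, PySem.Int.mod_natCast]
        omega
      rw [if_neg h2]
      subst ht
      simp only [pvF, Prod.mk.injEq]
      refine ⟨by simp, ?_⟩
      have e1 : (2 * t + 1) / 2 = t := by omega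
      have e2 : (2 * t + 1) % 2 = 1 := by omega
      have e3 : (2 * t + 1 + 1) / 2 = t + 1 := by omega
      have e4 : (2 * t + 1 + 1) % 2 = 0 := by omega
      rw [e1, e2, e3, e4]; push_cast; ring

-- B's map entry at Int index ↑k equals pvF.
theorem pvBentry (b minus : Int) (k : Nat) :
    b - 1 - (PySem.Int.floordiv ((k : Nat) : Int) 2) * (minus + 1)
      - (PySem.Int.mod ((k : Nat) : Int) 2) * minus
    = pvF b minus k := by
  rw [show (2 : Int) = ((2 : Nat) : Int) from rfl, PySem.Int.mod_natCast,
    PySem.Int.floordiv_natCast, pvF]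

-- ===== VERDICT (by name: the statement is the Claim_ definition above) =====
theorem generate_offset_0_spec : Claim_equal_generate_offset_0 := by
  intro a b c _ _
  unfold Spec_generate_offset_0 generate_offset_0 generate_offset_0_alt
  rw [PySem.List.pyRange_one]
  simp only [sub_zero, zero_add]
  rw [pvLoopA b _ ((c - 1).toNat)]
  simp only [List.map_map, List.cons_append, List.nil_append]
  congr 1
  refine List.map_congr_left (fun k _ => ?_)
  simp only [Function.comp_apply]
  exact (pvBentry b _ k).symm
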